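-- pv_equiv track=rewrite | github.com/ravardh/GIETU_SuperCoderBatch2 | Treasure_Hunt.py | max_treasure_locations
-- ===== SOURCE A (Python) =====
-- def max_treasure_locations(locations, compass_range):
--     if not locations:
--         return 0
--
--     locations.sort()
--     max_count = 1
--     n = len(locations)
--
--     left = 0
--     right = 1
--
--     while right < n:
--         if locations[right] - locations[left] <= compass_range:
--             max_count = max(max_count, right - left + 1)
--             right += 1
--         else:
--             left += 1
--
--     return max_count
-- ===== SOURCE B (Python) =====
-- def max_treasure_locations(locations, compass_range):
--     if not locations:
--         return 0
--     locations.sort()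
--     max_count = 1
--     for i in range(len(locations)):
--         target = locations[i] - compass_range
--         lo, hi = 0, i
--         while lo < hi:
--             mid = (lo + hi) // 2
--             if locations[mid] < target:
--                 lo = mid + 1
--             else:
--                 hi = mid
--         max_count = max(max_count, i - lo + 1)
--     return max_count
-- ===== Notes on version B (the rewrite author's own statement) =====
-- stated objective: alternative
-- what changed: Replaces A's linear two-pointer sliding-window scan by a per-element hand-written binary search (bisect_left over the already-scanned prefix) for the leftmost location within compass_range; both sort the list in place.
import Mathlib
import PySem

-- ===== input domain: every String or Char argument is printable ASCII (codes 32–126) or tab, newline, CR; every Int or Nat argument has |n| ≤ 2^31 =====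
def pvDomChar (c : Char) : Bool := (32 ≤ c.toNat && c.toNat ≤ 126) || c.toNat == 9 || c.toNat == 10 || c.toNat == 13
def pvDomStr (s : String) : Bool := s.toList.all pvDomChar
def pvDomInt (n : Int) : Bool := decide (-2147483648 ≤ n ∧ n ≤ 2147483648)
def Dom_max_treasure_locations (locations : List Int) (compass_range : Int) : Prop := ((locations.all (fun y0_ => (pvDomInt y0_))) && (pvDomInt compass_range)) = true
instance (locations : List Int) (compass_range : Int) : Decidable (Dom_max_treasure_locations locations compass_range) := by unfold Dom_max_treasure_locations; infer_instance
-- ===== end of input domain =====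

-- B replaces A's linear two-pointer sliding-window scan with a per-element hand-written binary
-- search for the leftmost location in range (objective: alternative algorithm, same cost class).
-- Both A and B sort `locations` in place in Python; the equivalence proved here is about the
-- RETURN value (the mutation is identical in both).

-- ===== PORT A =====
-- A's `while right < n` two-pointer loop. Each iteration increments left or right, left stops
-- before n (IndexError) and right stops at n, so fuel 2*n covers every Python iteration; the
-- fuel-0 arm is unreachable from the top-level call. The `| _, _ => 0` arm is where Python
-- raises IndexError (locations[left] with left out of range), excluded by Pre_.
def pvLoopA (ys : List Int) (c : Int) (n : Nat) (fuel left right : Nat) (mc : Int) : Int :=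
  match fuel with
  | 0 => 0
  | fuel + 1 =>
    if right < n then
      match PySem.List.pyGet? ys (right : Int), PySem.List.pyGet? ys (left : Int) with
      | some xr, some xl =>
        if xr - xl ≤ c then
          pvLoopA ys c n fuel left (right + 1) (max mc ((right : Int) - (left : Int) + 1))
        else
          pvLoopA ys c n fuel (left + 1) right mc
      | _, _ => 0
    else mc

def max_treasure_locations (locations : List Int) (compass_range : Int) : Int :=
  if locations = [] then 0
  else
    let ys := PySem.List.sorted locations (fun x => x) false  -- locations.sort()
    pvLoopA ys compass_range ys.length (2 * ys.length) 0 1 1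

-- ===== PORT B =====
-- B's hand-written bisect_left loop `while lo < hi: …`; each iteration shrinks hi - lo, so
-- fuel hi - lo ≤ i covers every Python iteration (the fuel-0 arm is unreachable with lo < hi).
-- mid is always a valid index at every call site (mid < hi ≤ i < len), so pyGetD is exact.
def pvBisect (ys : List Int) (t : Int) (fuel lo hi : Nat) : Nat :=
  match fuel with
  | 0 => lo
  | fuel + 1 =>
    if lo < hi then
      let mid := (lo + hi) / 2  -- (lo + hi) // 2, both non-negative
      if PySem.List.pyGetD ys (mid : Int) 0 < t then pvBisect ys t fuel (mid + 1) hi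
      else pvBisect ys t fuel lo mid
    else lo

def max_treasure_locations_alt (locations : List Int) (compass_range : Int) : Int :=
  if locations = [] then 0
  else
    let ys := PySem.List.sorted locations (fun x => x) false  -- locations.sort()
    (List.range ys.length).foldl  -- for i in range(len(locations))
      (fun (mc : Int) (i : Nat) =>
        let t := PySem.List.pyGetD ys (i : Int) 0 - compass_range
        let j := pvBisect ys t i 0 i
        max mc ((i : Int) - (j : Int) + 1)) 1

-- ===== PRECONDITION & SPEC =====
-- Pre_ excludes exactly the inputs on which A raises IndexError: with ≥ 2 locations and a
-- negative compass_range the left pointer runs past the end of the list.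
def Pre_max_treasure_locations (locations : List Int) (compass_range : Int) : Prop :=
  locations.length ≤ 1 ∨ 0 ≤ compass_range
instance (locations : List Int) (compass_range : Int) : Decidable (Pre_max_treasure_locations locations compass_range) := by unfold Pre_max_treasure_locations; infer_instance

def pvWitness_max_treasure_locations : List Int × Int := ([1, 4, 2], 2)

def Spec_max_treasure_locations (locations : List Int) (compass_range : Int) (out : Int) : Prop := out = max_treasure_locations_alt locations compass_range
instance (locations : List Int) (compass_range : Int) (out : Int) : Decidable (Spec_max_treasure_locations locations compass_range out) := by unfold Spec_max_treasure_locations; infer_instance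

-- ===== CLAIM (what is proved, stated in full; the proofs are below) =====
def Claim_equal_max_treasure_locations : Prop := ∀ (locations : List Int) (compass_range : Int), Dom_max_treasure_locations locations compass_range → Pre_max_treasure_locations locations compass_range → Spec_max_treasure_locations locations compass_range (max_treasure_locations locations compass_range)

-- ===== LEMMAS AND PROOFS =====

-- the leftmost index l ≤ i with ys[i] - ys[l] ≤ c (both loops compute windows against it)
def pvL (ys : List Int) (c : Int) (i : Nat) : Nat :=
  List.findIdx (fun l => decide (ys.getD i 0 - ys.getD l 0 ≤ c)) (List.range (i + 1))

-- the common specification both loops are proved to compute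
def pvSpec (ys : List Int) (c : Int) (r : Nat) : Int :=
  (List.range r).foldl (fun (mc : Int) (i : Nat) => max mc ((i : Int) - (pvL ys c i : Int) + 1)) 1

lemma pvL_lt_length (ys : List Int) (c : Int) (i : Nat) (hc : 0 ≤ c) :
    List.findIdx (fun l => decide (ys.getD i 0 - ys.getD l 0 ≤ c)) (List.range (i + 1))
      < (List.range (i + 1)).length := by
  rw [List.findIdx_lt_length]
  exact ⟨i, List.mem_range.mpr (by omega), by simp only [decide_eq_true_eq, sub_self]; exact hc⟩

lemma pvL_le (ys : List Int) (c : Int) (i : Nat) (hc : 0 ≤ c) : pvL ys c i ≤ i := by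
  have h := pvL_lt_length ys c i hc
  simp only [List.length_range] at h
  unfold pvL
  omega

lemma pvL_sat (ys : List Int) (c : Int) (i : Nat) (hc : 0 ≤ c) :
    ys.getD i 0 - ys.getD (pvL ys c i) 0 ≤ c := by
  have h := List.findIdx_getElem (w := pvL_lt_length ys c i hc)
  simpa [pvL, List.getElem_range] using h

lemma pvL_min (ys : List Int) (c : Int) (i l : Nat) (hl : l < pvL ys c i) :
    c < ys.getD i 0 - ys.getD l 0 := by
  have h := List.not_of_lt_findIdx (p := fun l => decide (ys.getD i 0 - ys.getD l 0 ≤ c))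
    (xs := List.range (i + 1)) (i := l) hl
  simp only [List.getElem_range, decide_eq_false_iff_not, not_le] at h
  exact h

lemma pvL_eq (ys : List Int) (c : Int) (i k : Nat) (hc : 0 ≤ c)
    (hpk : ys.getD i 0 - ys.getD k 0 ≤ c)
    (hmin : ∀ l, l < k → c < ys.getD i 0 - ys.getD l 0) : pvL ys c i = k := by
  rcases Nat.lt_trichotomy (pvL ys c i) k with h | h | h
  · exact absurd (pvL_sat ys c i hc) (by have := hmin _ h; omega)
  · exact h
  · exact absurd hpk (by have := pvL_min ys c i k h; omega)

-- monotonicity of getD on the sorted list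
lemma pvMono (xs : List Int) (p q : Nat) (hpq : p ≤ q)
    (hq : q < (PySem.List.sorted xs (fun x => x) false).length) :
    (PySem.List.sorted xs (fun x => x) false).getD p 0 ≤
      (PySem.List.sorted xs (fun x => x) false).getD q 0 := by
  have hp : p < (PySem.List.sorted xs (fun x => x) false).length := lt_of_le_of_lt hpq hq
  rw [List.getD_eq_getElem _ _ hp, List.getD_eq_getElem _ _ hq]
  exact PySem.List.sorted_id_getElem_mono xs hpq hq

-- B's binary search finds pvL
lemma pvBisect_eq (ys : List Int) (c : Int)
    (hmono : ∀ p q : Nat, p ≤ q → q < ys.length → ys.getD p 0 ≤ ys.getD q 0)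
    (hc : 0 ≤ c) (i : Nat) (hi : i < ys.length) :
    ∀ fuel lo hi2, hi2 - lo ≤ fuel → lo ≤ hi2 → hi2 ≤ i →
      lo ≤ pvL ys c i → pvL ys c i ≤ hi2 →
      pvBisect ys (ys.getD i 0 - c) fuel lo hi2 = pvL ys c i := by
  intro fuel
  induction fuel with
  | zero =>
    intro lo hi2 hd hlh hhi hL1 hL2
    simp only [pvBisect]
    omega
  | succ d ih =>
    intro lo hi2 hd hlh hhi hL1 hL2
    simp only [pvBisect]
    by_cases hlt : lo < hi2
    · simp only [hlt, if_true, PySem.List.pyGetD_natCast]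
      set mid := (lo + hi2) / 2 with hmid
      have hm1 : lo ≤ mid := by omega
      have hm2 : mid < hi2 := by omega
      by_cases hcmp : ys.getD mid 0 < ys.getD i 0 - c
      · simp only [hcmp, if_true]
        have hLgt : mid < pvL ys c i := by
          by_contra hcon
          have hle : pvL ys c i ≤ mid := by omega
          have hsat := pvL_sat ys c i hc
          have hmm : ys.getD (pvL ys c i) 0 ≤ ys.getD mid 0 := hmono _ _ hle (by omega)
          omega
        exact ih (mid + 1) hi2 (by omega) (by omega) hhi (by omega) hL2
      · simp only [hcmp, if_false]
        have hLle : pvL ys c i ≤ mid := by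
          by_contra hcon
          have := pvL_min ys c i mid (by omega)
          omega
        exact ih lo mid (by omega) hm1 (by omega) hL1 hLle
    · simp only [hlt, if_false]
      omega

-- A's two-pointer loop maintains: mc is the best window over rights already processed,
-- and every l < left is out of range for the current right
lemma pvLoopA_inv (ys : List Int) (c : Int)
    (hmono : ∀ p q : Nat, p ≤ q → q < ys.length → ys.getD p 0 ≤ ys.getD q 0)
    (hc : 0 ≤ c) :
    ∀ fuel left right mc, (ys.length - right) + (ys.length - left) < fuel →
      left ≤ right → right ≤ ys.length → 1 ≤ right →
      (∀ l, l < left → right < ys.length → c < ys.getD right 0 - ys.getD l 0) →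
      mc = pvSpec ys c right →
      pvLoopA ys c ys.length fuel left right mc = pvSpec ys c ys.length := by
  intro fuel
  induction fuel with
  | zero => intro left right mc hd; omega
  | succ d ih =>
    intro left right mc hd hlr hrn h1 hI2 hmc
    simp only [pvLoopA]
    by_cases h : right < ys.length
    · simp only [h, if_true]
      have hleft : left < ys.length := by omega
      have hgr : PySem.List.pyGet? ys (right : Int) = some (ys.getD right 0) := by
        rw [PySem.List.pyGet?_natCast, List.getElem?_eq_getElem h, List.getD_eq_getElem _ _ h]
      have hgl : PySem.List.pyGet? ys (left : Int) = some (ys.getD left 0) := by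
        rw [PySem.List.pyGet?_natCast, List.getElem?_eq_getElem hleft,
          List.getD_eq_getElem _ _ hleft]
      rw [hgr, hgl]  -- reduce the match to the some/some arm
      by_cases hif : ys.getD right 0 - ys.getD left 0 ≤ c
      · simp only [hif, if_true]
        have hLr : pvL ys c right = left :=
          pvL_eq ys c right left hc hif (fun l hl => hI2 l hl h)
        refine ih left (right + 1) _ (by omega) (by omega) (by omega) (by omega) ?_ ?_
        · intro l hl hr1
          have h2 := hI2 l hl h
          have h3 := hmono right (right + 1) (by omega) hr1
          omega
        · rw [hmc]
          unfold pvSpec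
          rw [List.range_succ, List.foldl_append]
          simp [hLr]
      · simp only [hif, if_false]
        have hne : left ≠ right := by
          intro he; rw [he] at hif; omega
        refine ih (left + 1) right mc (by omega) (by omega) hrn h1 ?_ hmc
        intro l hl _
        by_cases hll : l < left
        · exact hI2 l hll h
        · have hle : l = left := by omega
          subst hle; omega
    · simp only [h, if_false]
      have he : right = ys.length := by omega
      rw [hmc, he]

-- B's fold equals the spec fold (rewriting each step by pvBisect_eq)
lemma pvAlt_eq (locations : List Int) (c : Int) (hc : 0 ≤ c) (hne : locations ≠ []) :
    max_treasure_locations_alt locations c =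
      pvSpec (PySem.List.sorted locations (fun x => x) false) c
        (PySem.List.sorted locations (fun x => x) false).length := by
  rw [max_treasure_locations_alt]
  simp only [hne, if_false]
  set ys := PySem.List.sorted locations (fun x => x) false with hys
  unfold pvSpec
  apply PySem.List.foldl_congr_mem
  intro mc i hi
  have hilt : i < ys.length := List.mem_range.mp hi
  have hbe : pvBisect ys (PySem.List.pyGetD ys (i : Int) 0 - c) i 0 i = pvL ys c i := by
    rw [PySem.List.pyGetD_natCast]
    exact pvBisect_eq ys c (fun p q hpq hq => pvMono locations p q hpq hq) hc i hilt
      i 0 i (by omega) (by omega) (le_refl i) (by omega) (pvL_le ys c i hc)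
  simp only [hbe]

theorem pv_main (locations : List Int) (c : Int)
    (hpre : Pre_max_treasure_locations locations c) :
    max_treasure_locations locations c = max_treasure_locations_alt locations c := by
  by_cases hne : locations = []
  · rw [max_treasure_locations, max_treasure_locations_alt]; simp [hne]
  · have hlen : 0 < locations.length := List.length_pos_iff.mpr hne
    by_cases hc : 0 ≤ c
    · -- main case: non-negative range
      rw [max_treasure_locations]
      simp only [hne, if_false]
      rw [pvAlt_eq locations c hc hne]
      set ys := PySem.List.sorted locations (fun x => x) false with hys
      have hyslen : ys.length = locations.length := PySem.List.length_sorted _ _ _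
      have hmono : ∀ p q : Nat, p ≤ q → q < ys.length → ys.getD p 0 ≤ ys.getD q 0 :=
        fun p q hpq hq => pvMono locations p q hpq hq
      refine pvLoopA_inv ys c hmono hc (2 * ys.length) 0 1 1 (by omega) (by omega)
        (by omega) (le_refl 1) (by omega) ?_
      -- initial mc = pvSpec over range 1
      have hL0 : pvL ys c 0 = 0 := Nat.le_zero.mp (pvL_le ys c 0 hc)
      unfold pvSpec
      rw [List.range_succ]
      simp [hL0]
    · -- remaining Pre_ case: a single location, any compass_range
      have h1 : locations.length = 1 := by
        rcases hpre with h | h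
        · omega
        · omega
      rw [max_treasure_locations, max_treasure_locations_alt]
      simp only [hne, if_false]
      set ys := PySem.List.sorted locations (fun x => x) false with hys
      have hyslen : ys.length = 1 := by rw [PySem.List.length_sorted]; exact h1
      rw [hyslen, List.range_succ]
      simp [pvLoopA, pvBisect]

-- ===== VERDICT (by name: the statement is the Claim_ definition above) =====
theorem max_treasure_locations_spec : Claim_equal_max_treasure_locations := by
  intro locations c _ hpre
  unfold Spec_max_treasure_locations
  exact pv_main locations c hpre
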